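-- pv_equiv track=rewrite | github.com/jchamper/ChamperLab | CifAB-Drive-Modeling/simulation models and data/SLiM simulations/01_success_frequency.py | parse_slim
-- ===== SOURCE A (Python) =====
-- def parse_slim(slim_string):
--     ret = "0"
--     lines = slim_string.split('\n')
--     for line in lines:
--         if line.startswith("FIXED") or line.startswith("AFIXED"):
--             ret = "1"
--         elif line.startswith("LOST") or line.startswith("ALOST"):
--             ret = "0"
--     return ret
-- ===== SOURCE B (Python) =====
-- def parse_slim(slim_string):
--     for line in reversed(slim_string.split('\n')):
--         if line.startswith("FIXED") or line.startswith("AFIXED"):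
--             return "1"
--         if line.startswith("LOST") or line.startswith("ALOST"):
--             return "0"
--     return "0"
-- ===== Notes on version B (the rewrite author's own statement) =====
-- stated objective: alternative
-- what changed: Replaces the forward full pass that keeps overwriting a last-state accumulator with a reverse scan that returns immediately at the first (i.e. last-in-file) FIXED/LOST marker.
import Mathlib
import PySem

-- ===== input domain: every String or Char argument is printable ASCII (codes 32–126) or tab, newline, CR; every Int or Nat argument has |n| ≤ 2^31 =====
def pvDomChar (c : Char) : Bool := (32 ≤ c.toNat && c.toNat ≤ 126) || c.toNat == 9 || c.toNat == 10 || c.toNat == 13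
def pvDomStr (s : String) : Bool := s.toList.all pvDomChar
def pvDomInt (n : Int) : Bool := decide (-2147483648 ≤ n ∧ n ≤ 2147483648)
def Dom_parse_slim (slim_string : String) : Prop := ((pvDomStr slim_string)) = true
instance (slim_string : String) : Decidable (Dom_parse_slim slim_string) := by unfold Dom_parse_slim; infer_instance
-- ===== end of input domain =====

-- B replaces A's forward accumulate-last-state pass with a reverse scan that returns at the
-- first marker found (alternative decomposition; same return value).

-- ===== PORT A =====
def parse_slim (slim_string : String) : String :=
  ((PySem.Str.split? slim_string "\n").getD []).foldl
    (fun ret line =>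
      if PySem.Str.startswith line "FIXED" || PySem.Str.startswith line "AFIXED" then "1"
      else if PySem.Str.startswith line "LOST" || PySem.Str.startswith line "ALOST" then "0"
      else ret) "0"

-- ===== PORT B =====
def parse_slim_scanRev : List String → String
  | [] => "0"
  | line :: rest =>
    if PySem.Str.startswith line "FIXED" || PySem.Str.startswith line "AFIXED" then "1"
    else if PySem.Str.startswith line "LOST" || PySem.Str.startswith line "ALOST" then "0"
    else parse_slim_scanRev rest

def parse_slim_alt (slim_string : String) : String :=
  parse_slim_scanRev ((PySem.Str.split? slim_string "\n").getD []).reverse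

-- ===== PRECONDITION & SPEC =====
def Spec_parse_slim (slim_string : String) (out : String) : Prop := out = parse_slim_alt slim_string
instance (slim_string : String) (out : String) : Decidable (Spec_parse_slim slim_string out) := by unfold Spec_parse_slim; infer_instance

-- ===== CLAIM (what is proved, stated in full; the proofs are below) =====
def Claim_equal_parse_slim : Prop := ∀ (slim_string : String), Dom_parse_slim slim_string → Spec_parse_slim slim_string (parse_slim slim_string)

-- ===== LEMMAS AND PROOFS =====
theorem parse_slim_foldl_eq_scanRev (l : List String) :
    l.foldl (fun ret line =>
      if PySem.Str.startswith line "FIXED" || PySem.Str.startswith line "AFIXED" then "1"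
      else if PySem.Str.startswith line "LOST" || PySem.Str.startswith line "ALOST" then "0"
      else ret) "0" = parse_slim_scanRev l.reverse := by
  induction l using List.reverseRecOn with
  | nil => rfl
  | append_singleton l' x ih =>
    rw [List.foldl_append, List.reverse_append]
    simp only [List.foldl_cons, List.foldl_nil, List.reverse_singleton, List.singleton_append,
      parse_slim_scanRev]
    split_ifs <;> simp_all

-- ===== VERDICT (by name: the statement is the Claim_ definition above) =====
theorem parse_slim_spec : Claim_equal_parse_slim := by
  intro s _
  unfold Spec_parse_slim parse_slim parse_slim_alt
  exact parse_slim_foldl_eq_scanRev _
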